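-- pv_equiv track=rewrite | github.com/nineslop/ProgrammingCryptographicAlgorithms | Лабораторные работы КРИПТОГРАФИЯ/Шифрование шифрами однозначной замены/It's working/shannons_notebook.py | shannonsNotebookDecrypt
-- ===== SOURCE A (Python) =====
-- def shannonsNotebookDecrypt(encryptedText, t, a, c, alphabet):
--     decryptedText = "" # Расшифрованный текст
--     gamma = [t]
--     # Создание гаммы длины encryptedText / 2
--     for i in range(len(encryptedText) // 2):
--         gamma.append((a * gamma[-1] + c) % len(alphabet))
--     encryptedTextArr = [encryptedText[i:i+2] for i in range(0, len(encryptedText), 2)]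
--     # Проверка наличия значений для расшифровки
--     if not encryptedTextArr:
--         return ""
--     # xor гаммы и шифртекста
--     for i in range(len(encryptedTextArr)):
--         try:
--             decrypted_char_index = (int(encryptedTextArr[i]) ^ gamma[i]) - 1
--             decrypted_char = alphabet[decrypted_char_index % len(alphabet)]
--             decryptedText += decrypted_char
--         except ValueError:
--             # Обработка случая, когда строка не может быть преобразована в целое число
--             pass
--     decryptedText = decryptedText.replace("тчк", ".").replace("зпт", ",").replace("тире", "-").replace('прбл', ' ').replace('двтч', ':').replace('тчсзп', ';').replace('отскб', '(').replace('зкскб', ')').replace('впрзн', '?').replace('восклзн', '!').replace('првст', '\n')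
--     return decryptedText # Возврат расшифрованного текста
-- ===== SOURCE B (Python) =====
-- SUBS = (("\u0442\u0447\u043a", "."), ("\u0437\u043f\u0442", ","), ("\u0442\u0438\u0440\u0435", "-"),
--         ("\u043f\u0440\u0431\u043b", " "), ("\u0434\u0432\u0442\u0447", ":"), ("\u0442\u0447\u0441\u0437\u043f", ";"),
--         ("\u043e\u0442\u0441\u043a\u0431", "("), ("\u0437\u043a\u0441\u043a\u0431", ")"),
--         ("\u0432\u043f\u0440\u0437\u043d", "?"), ("\u0432\u043e\u0441\u043a\u043b\u0437\u043d", "!"),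
--         ("\u043f\u0440\u0432\u0441\u0442", "\n"))
--
--
-- def _gamma(k, t, a, c, L):
--     # Closed form of the k-th LCG state: g_k = a^k * t + c * (a^(k-1) + ... + 1)  (mod L),
--     # with the geometric sum recovered mod L from a^k mod (|a-1|*L); no sequential iteration.
--     if k == 0:
--         return t
--     if a == 1:
--         s = k % L
--     else:
--         d = a - 1
--         s = ((pow(a, k, abs(d) * L) - 1) // d) % L
--     return (pow(a, k, L) * t + c * s) % L
--
--
-- def shannonsNotebookDecrypt(encryptedText, t, a, c, alphabet):
--     L = len(alphabet)
--     n = len(encryptedText)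
--     out = []
--     for k in range((n + 1) // 2):
--         try:
--             v = int(encryptedText[2 * k:2 * k + 2])
--         except ValueError:
--             continue
--         out.append(alphabet[((v ^ _gamma(k, t, a, c, L)) - 1) % L])
--     text = "".join(out)
--     for old, new in SUBS:
--         text = text.replace(old, new)
--     return text
-- ===== Notes on version B (the rewrite author's own statement) =====
-- stated objective: alternative
-- what changed: Replaces A's sequentially generated gamma list (each LCG state derived from the previous one) by a closed-form formula computing the k-th LCG state independently per pair via modular exponentiation and a geometric-sum identity, with the substitution chain as a data-driven loop over a pair table.
import Mathlib
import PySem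

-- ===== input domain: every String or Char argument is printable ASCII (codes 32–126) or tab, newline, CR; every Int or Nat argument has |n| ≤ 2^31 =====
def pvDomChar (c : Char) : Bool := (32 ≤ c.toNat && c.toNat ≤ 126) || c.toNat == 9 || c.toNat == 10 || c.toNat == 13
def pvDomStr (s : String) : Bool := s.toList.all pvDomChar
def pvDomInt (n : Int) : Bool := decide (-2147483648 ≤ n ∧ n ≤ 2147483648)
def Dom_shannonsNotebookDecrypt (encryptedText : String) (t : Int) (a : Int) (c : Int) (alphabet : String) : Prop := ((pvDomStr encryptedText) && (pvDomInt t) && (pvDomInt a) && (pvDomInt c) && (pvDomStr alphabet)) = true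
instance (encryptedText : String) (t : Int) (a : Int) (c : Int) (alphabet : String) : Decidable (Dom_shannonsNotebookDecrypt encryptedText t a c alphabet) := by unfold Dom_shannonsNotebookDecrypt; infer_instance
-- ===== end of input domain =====

-- B replaces A's sequentially generated gamma list by a closed-form formula for the k-th LCG state
-- (modular power and geometric sum), computed independently per pair (objective: alternative; no speed claim).

-- ===== PORT A =====
def shannonsNotebookDecrypt (encryptedText : String) (t : Int) (a : Int) (c : Int) (alphabet : String) : String :=
  let s := encryptedText.toList
  let al := alphabet.toList
  let L : Int := (al.length : Int)
  let gamma : List Int :=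
    (List.range (s.length / 2)).foldl
      (fun gl _ => gl ++ [PySem.Int.mod (a * PySem.List.pyGetD gl (-1) 0 + c) L]) [t]
  let arr : List (List Char) :=
    (PySem.List.pyRange 0 (s.length : Int) 2).map
      (fun i => PySem.List.slice s (some i) (some (i + 2)))
  if arr = [] then "" else
    let dec : List Char :=
      (List.range arr.length).foldl
        (fun acc (i : Nat) =>
          match PySem.Int.ofChars? (PySem.List.pyGetD arr (i : Int) []) with
          | some v =>
              acc ++ [PySem.List.pyGetD al
                (PySem.Int.mod (PySem.Int.bxor v (PySem.List.pyGetD gamma (i : Int) 0) - 1) L) ' ']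
          | none => acc) []
    PySem.Str.replace (PySem.Str.replace (PySem.Str.replace (PySem.Str.replace (PySem.Str.replace
      (PySem.Str.replace (PySem.Str.replace (PySem.Str.replace (PySem.Str.replace (PySem.Str.replace
      (PySem.Str.replace (String.ofList dec) "тчк" ".") "зпт" ",") "тире" "-") "прбл" " ") "двтч" ":")
      "тчсзп" ";") "отскб" "(") "зкскб" ")") "впрзн" "?") "восклзн" "!") "првст" "\n"

-- ===== PORT B =====
def pvSubs : List (String × String) :=
  [("тчк", "."), ("зпт", ","), ("тире", "-"), ("прбл", " "), ("двтч", ":"), ("тчсзп", ";"),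
   ("отскб", "("), ("зкскб", ")"), ("впрзн", "?"), ("восклзн", "!"), ("првст", "\n")]

-- closed form of the k-th LCG state (Source B's _gamma): pow(a,k,m) is PySem.Int.powMod
def pvClosedGamma (k : Nat) (t a c L : Int) : Int :=
  if k = 0 then t
  else
    PySem.Int.mod (PySem.Int.powMod a k L * t + c *
      (if a = 1 then PySem.Int.mod (k : Int) L
       else PySem.Int.mod
         (PySem.Int.floordiv (PySem.Int.powMod a k (|a - 1| * L) - 1) (a - 1)) L)) L

def shannonsNotebookDecrypt_alt (encryptedText : String) (t : Int) (a : Int) (c : Int) (alphabet : String) : String :=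
  let s := encryptedText.toList
  let al := alphabet.toList
  let L : Int := (al.length : Int)
  let out : List Char :=
    (List.range ((s.length + 1) / 2)).foldl
      (fun acc (k : Nat) =>
        match PySem.Int.ofChars? (PySem.List.slice s (some (2 * (k : Int))) (some (2 * (k : Int) + 2))) with
        | some v =>
            acc ++ [PySem.List.pyGetD al
              (PySem.Int.mod (PySem.Int.bxor v (pvClosedGamma k t a c L) - 1) L) ' ']
        | none => acc) []
  pvSubs.foldl (fun txt p => PySem.Str.replace txt p.1 p.2) (String.ofList out)

-- ===== PRECONDITION & SPEC =====
-- Pre_ excludes exactly the inputs where the Python A raises ZeroDivisionError: an empty alphabet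
-- together with text whose modular reduction is actually reached (length ≥ 2, or a single
-- character that parses as an int).
def Pre_shannonsNotebookDecrypt (encryptedText : String) (t : Int) (a : Int) (c : Int) (alphabet : String) : Prop :=
  alphabet ≠ "" ∨ encryptedText = "" ∨
    (encryptedText.toList.length = 1 ∧ PySem.Int.ofChars? encryptedText.toList = none)
instance (encryptedText : String) (t : Int) (a : Int) (c : Int) (alphabet : String) : Decidable (Pre_shannonsNotebookDecrypt encryptedText t a c alphabet) := by unfold Pre_shannonsNotebookDecrypt; infer_instance

def pvWitness_shannonsNotebookDecrypt : String × Int × Int × Int × String := ("0807", 3, 5, 1, "abcdefgh")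

def Spec_shannonsNotebookDecrypt (encryptedText : String) (t : Int) (a : Int) (c : Int) (alphabet : String) (out : String) : Prop := out = shannonsNotebookDecrypt_alt encryptedText t a c alphabet
instance (encryptedText : String) (t : Int) (a : Int) (c : Int) (alphabet : String) (out : String) : Decidable (Spec_shannonsNotebookDecrypt encryptedText t a c alphabet out) := by unfold Spec_shannonsNotebookDecrypt; infer_instance

-- ===== CLAIM (what is proved, stated in full; the proofs are below) =====
def Claim_equal_shannonsNotebookDecrypt : Prop := ∀ (encryptedText : String) (t : Int) (a : Int) (c : Int) (alphabet : String), Dom_shannonsNotebookDecrypt encryptedText t a c alphabet → Pre_shannonsNotebookDecrypt encryptedText t a c alphabet → Spec_shannonsNotebookDecrypt encryptedText t a c alphabet (shannonsNotebookDecrypt encryptedText t a c alphabet)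

-- ===== LEMMAS AND PROOFS =====

lemma pv_rangeTwo (n : Nat) :
    PySem.List.pyRange 0 (n : Int) 2 = (List.range ((n + 1) / 2)).map (fun k : Nat => ((0 : Int) + 2 * (k : Int))) := by
  rw [PySem.List.pyRange_of_pos _ _ (by norm_num)]
  have hc : (if (0:Int) < (n:Int) then (((n:Int) - 0 + 2 - 1) / 2).toNat else 0) = (n + 1) / 2 := by
    split_ifs with h <;> omega
  rw [hc]

lemma pv_getD_map_range {α : Type} (f : Nat → α) (d : α) (N i : Nat) (h : i < N) :
    ((List.range N).map f).getD i d = f i := by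
  rw [List.getD_eq_getElem?_getD]
  simp [h]

lemma pv_gamma (a c L t : Int) : ∀ N : Nat,
    (List.range N).foldl
      (fun gl _ => gl ++ [PySem.Int.mod (a * PySem.List.pyGetD gl (-1) 0 + c) L]) [t]
    = (List.range (N + 1)).map (fun i => (fun g => PySem.Int.mod (a * g + c) L)^[i] t) := by
  intro N
  induction N with
  | zero => simp
  | succ N ih =>
    rw [List.range_succ, List.foldl_append, ih]
    simp only [List.foldl_cons, List.foldl_nil]
    have hsplit : (List.range (N + 1)).map (fun i => (fun g => PySem.Int.mod (a * g + c) L)^[i] t)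
        = (List.range N).map (fun i => (fun g => PySem.Int.mod (a * g + c) L)^[i] t)
          ++ [(fun g => PySem.Int.mod (a * g + c) L)^[N] t] := by
      rw [List.range_succ, List.map_append]; rfl
    rw [hsplit, PySem.List.pyGetD_neg_one_append_singleton]
    rw [List.range_succ (n := N + 1), List.map_append, ← hsplit]
    congr 1
    simp [Function.iterate_succ_apply']

lemma pv_chain (x : String) :
    pvSubs.foldl (fun txt p => PySem.Str.replace txt p.1 p.2) x
    = PySem.Str.replace (PySem.Str.replace (PySem.Str.replace (PySem.Str.replace (PySem.Str.replace
      (PySem.Str.replace (PySem.Str.replace (PySem.Str.replace (PySem.Str.replace (PySem.Str.replace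
      (PySem.Str.replace x "\u0442\u0447\u043a" ".") "\u0437\u043f\u0442" ",") "\u0442\u0438\u0440\u0435" "-") "\u043f\u0440\u0431\u043b" " ") "\u0434\u0432\u0442\u0447" ":")
      "\u0442\u0447\u0441\u0437\u043f" ";") "\u043e\u0442\u0441\u043a\u0431" "(") "\u0437\u043a\u0441\u043a\u0431" ")") "\u0432\u043f\u0440\u0437\u043d" "?") "\u0432\u043e\u0441\u043a\u043b\u0437\u043d" "!") "\u043f\u0440\u0432\u0441\u0442" "\n" := by
  simp [pvSubs]

-- the iterated LCG state in closed form
lemma pv_mod_absorb (a c L x : Int) : (a * (x % L) + c) % L = (a * x + c) % L := by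
  conv_rhs => rw [show a * x + c = a * (x % L) + c + L * (a * (x / L)) by rw [Int.emod_def]; ring]
  rw [Int.add_mul_emod_self_left]

lemma pv_iter_formula (a c L t : Int) (hL : 0 < L) :
    ∀ k : Nat, k ≠ 0 →
      (fun g => PySem.Int.mod (a * g + c) L)^[k] t
        = (a ^ k * t + c * (∑ j ∈ Finset.range k, a ^ j)) % L := by
  intro k hk
  induction k with
  | zero => omega
  | succ i ih =>
    rcases Nat.eq_zero_or_pos i with h0 | hi
    · subst h0
      simp [PySem.Int.mod_eq_emod_of_pos hL]
    · rw [Function.iterate_succ_apply', ih (by omega)]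
      show PySem.Int.mod _ L = _
      rw [PySem.Int.mod_eq_emod_of_pos hL, pv_mod_absorb]
      congr 1
      rw [geom_sum_succ]
      ring

-- Source B's closed form computes the same value
lemma pv_closed_formula (a c L t : Int) (hL : 0 < L) (k : Nat) (hk : k ≠ 0) :
    pvClosedGamma k t a c L = (a ^ k * t + c * (∑ j ∈ Finset.range k, a ^ j)) % L := by
  have h1 : (a ^ k % L) ≡ a ^ k [ZMOD L] := Int.emod_emod_of_dvd _ dvd_rfl
  rw [pvClosedGamma, if_neg hk]
  by_cases ha : a = 1
  · rw [if_pos ha]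
    subst ha
    have hSum : (∑ j ∈ Finset.range k, (1 : Int) ^ j) = (k : Int) := by simp
    rw [hSum, PySem.Int.powMod, PySem.Int.mod_eq_emod_of_pos hL,
      PySem.Int.mod_eq_emod_of_pos hL, PySem.Int.mod_eq_emod_of_pos hL]
    exact (h1.mul_right t).add (Int.ModEq.mul_left c (Int.emod_emod_of_dvd _ dvd_rfl))
  · rw [if_neg ha]
    have hd : a - 1 ≠ 0 := sub_ne_zero.mpr ha
    have hm : 0 < |a - 1| * L := mul_pos (abs_pos.mpr hd) hL
    have hgeom : a ^ k - 1 = (a - 1) * (∑ j ∈ Finset.range k, a ^ j) := by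
      rw [mul_comm, geom_sum_mul]
    set q : Int := a ^ k / (|a - 1| * L) with hq
    have hr : a ^ k % (|a - 1| * L) = a ^ k - |a - 1| * L * q := by
      rw [Int.emod_def]
    -- the exact quotient y with its congruence to the geometric sum
    obtain ⟨y, hy, hyS⟩ :
        ∃ y : Int, a ^ k % (|a - 1| * L) - 1 = (a - 1) * y
          ∧ y ≡ (∑ j ∈ Finset.range k, a ^ j) [ZMOD L] := by
      rcases lt_or_gt_of_ne hd with hneg | hpos
      · refine ⟨(∑ j ∈ Finset.range k, a ^ j) + L * q, ?_, ?_⟩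
        · rw [hr, abs_of_neg (by omega : a - 1 < 0)]
          have h2 := hgeom
          ring_nf
          ring_nf at h2
          omega
        · show ((∑ j ∈ Finset.range k, a ^ j) + L * q) % L = _
          rw [mul_comm L q]
          exact Int.add_mul_emod_self_right _ _ _
      · refine ⟨(∑ j ∈ Finset.range k, a ^ j) - L * q, ?_, ?_⟩
        · rw [hr, abs_of_pos (by omega : (0:Int) < a - 1)]
          have h2 := hgeom
          ring_nf
          ring_nf at h2
          omega
        · show ((∑ j ∈ Finset.range k, a ^ j) - L * q) % L = _
          rw [sub_eq_add_neg, ← mul_neg, mul_comm L (-q)]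
          exact Int.add_mul_emod_self_right _ _ _
    have hfd : PySem.Int.floordiv (PySem.Int.powMod a k (|a - 1| * L) - 1) (a - 1) = y := by
      have hdvd : PySem.Int.mod (PySem.Int.powMod a k (|a - 1| * L) - 1) (a - 1) = 0 := by
        rw [PySem.Int.mod_eq_zero_iff_dvd]
        exact ⟨y, by rw [PySem.Int.powMod, PySem.Int.mod_eq_emod_of_pos hm]; exact hy⟩
      have hmul := PySem.Int.floordiv_mul_add_mod (PySem.Int.powMod a k (|a - 1| * L) - 1) (a - 1)
      rw [hdvd, add_zero] at hmul
      have h3 : PySem.Int.floordiv (PySem.Int.powMod a k (|a - 1| * L) - 1) (a - 1) * (a - 1)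
          = y * (a - 1) := by
        rw [hmul, PySem.Int.powMod, PySem.Int.mod_eq_emod_of_pos hm, hy, mul_comm]
      exact mul_right_cancel₀ hd h3
    rw [hfd, PySem.Int.powMod, PySem.Int.mod_eq_emod_of_pos hL,
      PySem.Int.mod_eq_emod_of_pos hL, PySem.Int.mod_eq_emod_of_pos hL]
    exact (h1.mul_right t).add
      (Int.ModEq.mul_left c ((Int.emod_emod_of_dvd _ dvd_rfl).trans hyS))

lemma pv_closed_iter (a c L t : Int) (hL : 0 < L) (k : Nat) :
    pvClosedGamma k t a c L = (fun g => PySem.Int.mod (a * g + c) L)^[k] t := by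
  cases k with
  | zero => simp [pvClosedGamma]
  | succ i =>
      rw [pv_closed_formula a c L t hL (i+1) (by omega), pv_iter_formula a c L t hL (i+1) (by omega)]

lemma pv_main (e : String) (t a c : Int) (al : String)
    (hgood : ∀ k < (e.toList.length + 1) / 2,
      pvClosedGamma k t a c (al.toList.length : Int)
        = (fun g => PySem.Int.mod (a * g + c) (al.toList.length : Int))^[k] t) :
    shannonsNotebookDecrypt e t a c al = shannonsNotebookDecrypt_alt e t a c al := by
  simp only [shannonsNotebookDecrypt, shannonsNotebookDecrypt_alt]
  rw [pv_rangeTwo (e.toList.length), pv_chain]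
  by_cases h0 : e.toList.length = 0
  · rw [h0]
    norm_num
    set_option maxRecDepth 4096 in decide
  · have harr : List.map (fun i => PySem.List.slice e.toList (some i) (some (i + 2)))
        (List.map (fun k : Nat => ((0:Int) + 2 * (k:Int))) (List.range ((e.toList.length + 1) / 2))) ≠ [] := by
      simp [List.range_eq_nil]
      exact fun he => h0 (by simp [he])
    rw [if_neg harr]
    rw [pv_gamma a c (al.toList.length : Int) t (e.toList.length / 2)]
    have hcongr :
        List.foldl (fun acc (i : Nat) =>
          match PySem.Int.ofChars? (PySem.List.pyGetD (List.map (fun i => PySem.List.slice e.toList (some i) (some (i + 2)))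
            (List.map (fun k : Nat => ((0:Int) + 2 * (k:Int))) (List.range ((e.toList.length + 1) / 2)))) (i : Int) []) with
          | some v => acc ++ [PySem.List.pyGetD al.toList
              (PySem.Int.mod (PySem.Int.bxor v (PySem.List.pyGetD
                  (List.map (fun i => (fun g => PySem.Int.mod (a * g + c) (al.toList.length : Int))^[i] t)
                    (List.range (e.toList.length / 2 + 1))) (i : Int) 0) - 1) (al.toList.length : Int)) ' ']
          | none => acc) [] (List.range (List.map (fun i => PySem.List.slice e.toList (some i) (some (i + 2)))
            (List.map (fun k : Nat => ((0:Int) + 2 * (k:Int))) (List.range ((e.toList.length + 1) / 2)))).length)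
        = List.foldl (fun acc (k : Nat) =>
          match PySem.Int.ofChars? (PySem.List.slice e.toList (some (2 * (k : Int))) (some (2 * (k : Int) + 2))) with
          | some v => acc ++ [PySem.List.pyGetD al.toList
              (PySem.Int.mod (PySem.Int.bxor v (pvClosedGamma k t a c (al.toList.length : Int)) - 1)
                (al.toList.length : Int)) ' ']
          | none => acc) [] (List.range ((e.toList.length + 1) / 2)) := by
      simp only [List.length_map, List.length_range]
      refine PySem.List.foldl_congr_mem _ _ _ _ ?_
      intro acc i hi
      rw [List.mem_range] at hi
      rw [PySem.List.pyGetD_natCast, PySem.List.pyGetD_natCast, List.map_map,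
        pv_getD_map_range _ _ _ _ hi,
        pv_getD_map_range _ _ _ _ (by omega : i < e.toList.length / 2 + 1),
        ← hgood i hi]
      norm_num [Function.comp]
    rw [hcongr]

-- ===== VERDICT (by name: the statement is the Claim_ definition above) =====
theorem shannonsNotebookDecrypt_spec : Claim_equal_shannonsNotebookDecrypt := by
  intro e t a c al _ hpre
  refine pv_main e t a c al ?_
  intro k hk
  rcases hpre with hal | he | ⟨h1, _⟩
  · have hne : al.toList ≠ [] := by simpa [String.toList_eq_nil_iff] using hal
    have hL : 0 < (al.toList.length : Int) := by
      have := List.length_pos_of_ne_nil hne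
      omega
    exact pv_closed_iter _ _ _ _ hL k
  · subst he
    have hnil : ("" : String).toList = [] := rfl
    rw [hnil] at hk
    simp at hk
  · rw [h1] at hk
    have hk0 : k = 0 := by omega
    subst hk0
    simp [pvClosedGamma]
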